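-- pv_equiv track=rewrite | github.com/arudhir/mitonet | main.py | _get_top_level_pathways
-- ===== SOURCE A (Python) =====
-- from typing import Dict, List, Set, Tuple, Optional
--
-- def _get_top_level_pathways(pathways: List[str]) -> List[str]:
--     """
--     Extract top-level pathway categories
--     """
--     top_level = set()
--
--     for pathway in pathways:
--         # Extract high-level categories from pathway names
--         if 'metabolism' in pathway.lower():
--             top_level.add('Metabolism')
--         elif 'signal' in pathway.lower():
--             top_level.add('Signaling')
--         elif 'transport' in pathway.lower():
--             top_level.add('Transport')
--         elif 'immune' in pathway.lower():
--             top_level.add('Immune Response')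
--         elif 'cell cycle' in pathway.lower():
--             top_level.add('Cell Cycle')
--         elif 'apoptosis' in pathway.lower():
--             top_level.add('Cell Death')
--         else:
--             top_level.add('Other')
--
--     return list(top_level)
-- ===== SOURCE B (Python) =====
-- # Category-major sieve: instead of classifying each pathway with an elif chain,
-- # repeatedly partition the shrinking list of unclaimed pathways by each keyword,
-- # recording each category with the index of its first claimant, then emit the
-- # categories sorted by that index (deterministic first-occurrence order; A's
-- # list(set) order is hash-dependent, the results are equal as sets).
--
-- _TABLE = [
--     ("metabolism", "Metabolism"),
--     ("signal", "Signaling"),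
--     ("transport", "Transport"),
--     ("immune", "Immune Response"),
--     ("cell cycle", "Cell Cycle"),
--     ("apoptosis", "Cell Death"),
-- ]
--
--
-- def _get_top_level_pathways(pathways):
--     remaining = [(i, p.lower()) for i, p in enumerate(pathways)]
--     firsts = []
--     for kw, label in _TABLE:
--         claimed = [(i, l) for i, l in remaining if kw in l]
--         if claimed:
--             firsts.append((claimed[0][0], label))
--         remaining = [(i, l) for i, l in remaining if kw not in l]
--     if remaining:
--         firsts.append((remaining[0][0], "Other"))
--     firsts.sort(key=lambda t: t[0])
--     return [label for _, label in firsts]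
-- ===== Notes on version B (the rewrite author's own statement) =====
-- stated objective: alternative
-- what changed: Replaces the per-pathway elif chain accumulating into a set by a category-major sieve: for each keyword in priority order it partitions the shrinking list of unclaimed (index, lowercased) pathways, records the category with its first claimant's index, then emits categories sorted by that index (deterministic first-occurrence order; A's list(set) order is hash-dependent, equal as sets).
import Mathlib
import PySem

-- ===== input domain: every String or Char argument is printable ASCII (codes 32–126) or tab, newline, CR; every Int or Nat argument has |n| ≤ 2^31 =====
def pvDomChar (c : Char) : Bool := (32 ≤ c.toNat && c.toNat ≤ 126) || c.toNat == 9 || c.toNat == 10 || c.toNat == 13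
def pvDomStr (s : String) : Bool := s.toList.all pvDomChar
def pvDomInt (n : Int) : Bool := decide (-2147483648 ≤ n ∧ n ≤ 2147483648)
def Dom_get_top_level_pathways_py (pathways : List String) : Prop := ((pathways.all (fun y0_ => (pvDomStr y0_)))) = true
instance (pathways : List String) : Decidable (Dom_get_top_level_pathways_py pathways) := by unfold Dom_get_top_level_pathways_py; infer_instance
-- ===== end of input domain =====

-- B replaces A's per-pathway elif chain accumulating into a set by a category-major
-- sieve: for each keyword in priority order it partitions the shrinking list of
-- unclaimed (index, lowercased) pathways, records the category with its first
-- claimant's index, and emits the categories sorted by that index (deterministic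
-- first-occurrence order; A's Python returns list(set), whose order is hash-dependent
-- and not modelled — the ports agree exactly, the Pythons agree as sets).

-- ===== PORT A =====
-- A: loop over pathways, elif chain on 'kw in pathway.lower()', add label to a set, return list(set).
def get_top_level_pathways_py (pathways : List String) : List String :=
  (pathways.foldl (fun (top_level : PySem.Set String) pathway =>
    if PySem.Str.isIn "metabolism" (PySem.Str.lower pathway) then top_level.add "Metabolism"
    else if PySem.Str.isIn "signal" (PySem.Str.lower pathway) then top_level.add "Signaling"
    else if PySem.Str.isIn "transport" (PySem.Str.lower pathway) then top_level.add "Transport"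
    else if PySem.Str.isIn "immune" (PySem.Str.lower pathway) then top_level.add "Immune Response"
    else if PySem.Str.isIn "cell cycle" (PySem.Str.lower pathway) then top_level.add "Cell Cycle"
    else if PySem.Str.isIn "apoptosis" (PySem.Str.lower pathway) then top_level.add "Cell Death"
    else top_level.add "Other") PySem.Set.empty)
  -- list(top_level): a Python set's iteration order is not modelled; the distinct
  -- elements are exact.

-- ===== PORT B =====
def bTable : List (String × String) :=
  [("metabolism", "Metabolism"), ("signal", "Signaling"), ("transport", "Transport"),
   ("immune", "Immune Response"), ("cell cycle", "Cell Cycle"), ("apoptosis", "Cell Death")]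

-- one iteration of Source B's "for kw, label in _TABLE" loop over the state (remaining, firsts)
def bStep (st : List (Int × String) × List (Int × String)) (kv : String × String) :
    List (Int × String) × List (Int × String) :=
  (st.1.filter (fun il => !PySem.Str.isIn kv.1 il.2),
   -- claimed = [(i, l) for i, l in remaining if kw in l]; if claimed: firsts.append((claimed[0][0], label))
   match st.1.filter (fun il => PySem.Str.isIn kv.1 il.2) with
   | [] => st.2
   | c :: _ => st.2 ++ [(c.1, kv.2)])

def get_top_level_pathways_py_alt (pathways : List String) : List String :=
  -- remaining = [(i, p.lower()) for i, p in enumerate(pathways)]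
  let remaining0 := (PySem.List.enumerate pathways 0).map (fun ip => (ip.1, PySem.Str.lower ip.2))
  let st := bTable.foldl bStep (remaining0, [])
  -- if remaining: firsts.append((remaining[0][0], "Other"))
  let firsts := match st.1 with
    | [] => st.2
    | c :: _ => st.2 ++ [(c.1, "Other")]
  (PySem.List.sorted firsts (fun t => t.1) false).map (fun t => t.2)

-- ===== PRECONDITION & SPEC =====
def Spec_get_top_level_pathways_py (pathways : List String) (out : List String) : Prop := out = get_top_level_pathways_py_alt pathways
instance (pathways : List String) (out : List String) : Decidable (Spec_get_top_level_pathways_py pathways out) := by unfold Spec_get_top_level_pathways_py; infer_instance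

-- ===== CLAIM (what is proved, stated in full; the proofs are below) =====
def Claim_equal_get_top_level_pathways_py : Prop := ∀ (pathways : List String), Dom_get_top_level_pathways_py pathways → Spec_get_top_level_pathways_py pathways (get_top_level_pathways_py pathways)

-- ===== LEMMAS AND PROOFS =====

-- the classification A's elif chain performs on the lowered string
def cls (l : String) : String :=
  if PySem.Str.isIn "metabolism" l then "Metabolism"
  else if PySem.Str.isIn "signal" l then "Signaling"
  else if PySem.Str.isIn "transport" l then "Transport"
  else if PySem.Str.isIn "immune" l then "Immune Response"
  else if PySem.Str.isIn "cell cycle" l then "Cell Cycle"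
  else if PySem.Str.isIn "apoptosis" l then "Cell Death"
  else "Other"

def SEVEN : List String :=
  ["Metabolism", "Signaling", "Transport", "Immune Response", "Cell Cycle", "Cell Death", "Other"]

theorem cls_mem_SEVEN (l : String) : cls l ∈ SEVEN := by
  unfold cls SEVEN; split_ifs <;> simp

-- first element of R whose class is L
def firstOf (R : List (Int × String)) (L : String) : Option (Int × String) :=
  (R.filter (fun il => cls il.2 == L)).head?

-- first-occurrence (index, class) pairs of R, in occurrence order
def dd (R : List (Int × String)) : List (Int × String) :=
  match R with
  | [] => []
  | (i, l) :: R' => (i, cls l) :: dd (R'.filter (fun jl => cls jl.2 != cls l))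
termination_by R.length
decreasing_by
  simpa using Nat.lt_succ_of_le ((List.length_filter_le _ _).trans List.length_attach.le)

theorem dd_ind (motive : List (Int × String) → Prop)
    (h0 : motive [])
    (h1 : ∀ i l R', motive (R'.filter (fun jl => cls jl.2 != cls l)) → motive ((i, l) :: R')) :
    ∀ R, motive R := by
  intro R
  generalize hn : R.length = n
  induction n using Nat.strong_induction_on generalizing R with
  | _ n ih =>
    cases R with
    | nil => exact h0
    | cons hd tl =>
      obtain ⟨i, l⟩ := hd
      apply h1
      apply ih (tl.filter (fun jl => cls jl.2 != cls l)).length _ _ rfl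
      subst hn
      simpa using Nat.lt_succ_of_le (List.length_filter_le _ _)

theorem dd_src (R : List (Int × String)) (p : Int × String) (hp : p ∈ dd R) :
    ∃ q ∈ R, p = (q.1, cls q.2) := by
  induction R using dd_ind generalizing p with
  | h0 => simp [dd] at hp
  | h1 i l R' ih =>
    rw [dd] at hp
    rcases List.mem_cons.mp hp with h | h
    · exact ⟨(i, l), by simp, h⟩
    · obtain ⟨q, hq, hpe⟩ := ih _ h
      exact ⟨q, List.mem_cons_of_mem _ (List.mem_of_mem_filter hq), hpe⟩

theorem dd_pairwise (R : List (Int × String)) (hR : R.Pairwise (fun a b => a.1 < b.1)) :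
    (dd R).Pairwise (fun a b => a.1 < b.1) := by
  induction R using dd_ind with
  | h0 => simp [dd]
  | h1 i l R' ih =>
    rw [dd]
    rw [List.pairwise_cons] at hR
    refine List.pairwise_cons.mpr ⟨?_, ih (hR.2.sublist (List.filter_sublist))⟩
    intro p hp
    obtain ⟨q, hq, hpe⟩ := dd_src _ _ hp
    have := hR.1 q (List.mem_of_mem_filter hq)
    simpa [hpe] using this

theorem dd_mem (R : List (Int × String)) (p : Int × String) :
    p ∈ dd R ↔ ∃ q, firstOf R p.2 = some q ∧ p.1 = q.1 := by
  induction R using dd_ind generalizing p with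
  | h0 => simp [dd, firstOf]
  | h1 i l R' ih =>
    rw [dd]
    by_cases hp2 : p.2 = cls l
    · have hf : firstOf ((i, l) :: R') p.2 = some (i, l) := by
        simp [firstOf, hp2]
      rw [hf]
      constructor
      · intro hmem
        rcases List.mem_cons.mp hmem with h | h
        · exact ⟨(i, l), rfl, by rw [h]⟩
        · obtain ⟨q, hq, hpe⟩ := dd_src _ _ h
          have hne : (cls q.2 != cls l) = true := (List.mem_filter.mp hq).2
          rw [bne_iff_ne] at hne
          exact absurd (by rw [hpe] at hp2; exact hp2) hne
      · rintro ⟨q, hq, h1⟩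
        obtain rfl : q = (i, l) := by simpa using hq.symm
        have hpe : p = (i, cls l) := Prod.ext (by simpa using h1) (by simpa using hp2)
        rw [hpe]
        exact List.mem_cons_self
    · have hne : p ≠ (i, cls l) := by
        intro he; exact hp2 (by rw [he])
      have hf : firstOf ((i, l) :: R') p.2
          = firstOf (R'.filter (fun jl => cls jl.2 != cls l)) p.2 := by
        unfold firstOf
        rw [List.filter_cons]
        have hc : (cls l == p.2) = false :=
          beq_eq_false_iff_ne.mpr (fun h => hp2 h.symm)
        rw [if_neg (by simp [hc])]
        congr 1
        rw [List.filter_filter]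
        apply List.filter_congr
        intro a _
        by_cases ha : cls a.2 = p.2
        · have : (cls a.2 != cls l) = true := by
            rw [bne_iff_ne]; rw [ha]; exact hp2
          simp [this]
        · simp [ha]
      rw [hf]
      simp only [List.mem_cons]
      rw [ih]
      constructor
      · rintro (h | h)
        · exact absurd h hne
        · exact h
      · intro h; right; exact h

-- unrolled characterization of B's table fold
def tPairs (T : List (String × String)) (R : List (Int × String)) : List (Int × String) :=
  match T with
  | [] => []
  | kv :: T' =>
      (((R.filter (fun il => PySem.Str.isIn kv.1 il.2)).head?).map (fun c => (c.1, kv.2))).toList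
        ++ tPairs T' (R.filter (fun il => !PySem.Str.isIn kv.1 il.2))

theorem foldl_bStep (T : List (String × String)) (R F : List (Int × String)) :
    T.foldl bStep (R, F) =
      (R.filter (fun il => !(T.any (fun kv => PySem.Str.isIn kv.1 il.2))), F ++ tPairs T R) := by
  induction T generalizing R F with
  | nil => simp [tPairs]
  | cons kv T' ih =>
    rw [List.foldl_cons, tPairs]
    show (T'.foldl bStep (bStep (R, F) kv)) = _
    rw [bStep]
    rw [ih]
    have hfil : (R.filter (fun il => !PySem.Str.isIn kv.1 il.2)).filter
          (fun il => !(T'.any (fun kv' => PySem.Str.isIn kv'.1 il.2)))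
        = R.filter (fun il => !((kv :: T').any (fun kv' => PySem.Str.isIn kv'.1 il.2))) := by
      rw [List.filter_filter]
      apply List.filter_congr
      intro il _
      simp only [List.any_cons, Bool.not_or]
      exact Bool.and_comm _ _
    cases hcl : R.filter (fun il => PySem.Str.isIn kv.1 il.2) with
    | nil =>
      simp
      apply List.filter_congr
      intro il _
      exact Bool.and_comm _ _
    | cons c cs =>
      simp
      apply List.filter_congr
      intro il _
      exact Bool.and_comm _ _

-- the categories present in R, paired with the index of their first representative,
-- in the fixed SEVEN order
def ft (R : List (Int × String)) : List (Int × String) :=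
  SEVEN.filterMap (fun L => (firstOf R L).map (fun q => (q.1, L)))

theorem filterMap_eq_flatMap_toList {α β : Type} (f : α → Option β) (l : List α) :
    l.filterMap f = l.flatMap (fun a => (f a).toList) := by
  induction l with
  | nil => rfl
  | cons x xs ih => cases h : f x <;> simp [h, ih]

-- B's complete "firsts" list (after the Other append) is ft R
theorem firsts_eq_ft (R : List (Int × String)) :
    tPairs bTable R ++
      (match R.filter (fun il => !(bTable.any (fun kv => PySem.Str.isIn kv.1 il.2))) with
       | [] => ([] : List (Int × String))
       | c :: _ => [(c.1, "Other")]) = ft R := by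
  have e1 : R.filter (fun il => PySem.Str.isIn "metabolism" il.2)
      = R.filter (fun il => cls il.2 == "Metabolism") := by
    apply List.filter_congr; intro a _; unfold cls; split_ifs <;> simp_all
  have e2 : (R.filter (fun il => !PySem.Str.isIn "metabolism" il.2)).filter
        (fun il => PySem.Str.isIn "signal" il.2)
      = R.filter (fun il => cls il.2 == "Signaling") := by
    rw [List.filter_filter]
    apply List.filter_congr; intro a _; unfold cls; split_ifs <;> simp_all
  have e3 : ((R.filter (fun il => !PySem.Str.isIn "metabolism" il.2)).filter
        (fun il => !PySem.Str.isIn "signal" il.2)).filter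
        (fun il => PySem.Str.isIn "transport" il.2)
      = R.filter (fun il => cls il.2 == "Transport") := by
    rw [List.filter_filter, List.filter_filter]
    apply List.filter_congr; intro a _; unfold cls; split_ifs <;> simp_all
  have e4 : (((R.filter (fun il => !PySem.Str.isIn "metabolism" il.2)).filter
        (fun il => !PySem.Str.isIn "signal" il.2)).filter
        (fun il => !PySem.Str.isIn "transport" il.2)).filter
        (fun il => PySem.Str.isIn "immune" il.2)
      = R.filter (fun il => cls il.2 == "Immune Response") := by
    rw [List.filter_filter, List.filter_filter, List.filter_filter]
    apply List.filter_congr; intro a _; unfold cls; split_ifs <;> simp_all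
  have e5 : ((((R.filter (fun il => !PySem.Str.isIn "metabolism" il.2)).filter
        (fun il => !PySem.Str.isIn "signal" il.2)).filter
        (fun il => !PySem.Str.isIn "transport" il.2)).filter
        (fun il => !PySem.Str.isIn "immune" il.2)).filter
        (fun il => PySem.Str.isIn "cell cycle" il.2)
      = R.filter (fun il => cls il.2 == "Cell Cycle") := by
    rw [List.filter_filter, List.filter_filter, List.filter_filter, List.filter_filter]
    apply List.filter_congr; intro a _; unfold cls; split_ifs <;> simp_all
  have e6 : (((((R.filter (fun il => !PySem.Str.isIn "metabolism" il.2)).filter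
        (fun il => !PySem.Str.isIn "signal" il.2)).filter
        (fun il => !PySem.Str.isIn "transport" il.2)).filter
        (fun il => !PySem.Str.isIn "immune" il.2)).filter
        (fun il => !PySem.Str.isIn "cell cycle" il.2)).filter
        (fun il => PySem.Str.isIn "apoptosis" il.2)
      = R.filter (fun il => cls il.2 == "Cell Death") := by
    rw [List.filter_filter, List.filter_filter, List.filter_filter, List.filter_filter,
        List.filter_filter]
    apply List.filter_congr; intro a _; unfold cls; split_ifs <;> simp_all
  have e7 : R.filter (fun il => !(bTable.any (fun kv => PySem.Str.isIn kv.1 il.2)))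
      = R.filter (fun il => cls il.2 == "Other") := by
    apply List.filter_congr; intro a _
    simp only [bTable, List.any_cons, List.any_nil]
    unfold cls; split_ifs <;> simp_all
  rw [e7]
  unfold ft
  rw [filterMap_eq_flatMap_toList]
  simp only [SEVEN, List.flatMap_cons, List.flatMap_nil, List.append_nil, firstOf]
  simp only [bTable, tPairs]
  rw [e1, e2, e3, e4, e5, e6]
  simp only [List.append_nil, List.append_assoc]
  cases ho : R.filter (fun il => cls il.2 == "Other") with
  | nil => simp
  | cons c cs => simp

theorem firstOf_some_cls (R : List (Int × String)) (L : String) (q : Int × String)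
    (h : firstOf R L = some q) : cls q.2 = L := by
  unfold firstOf at h
  have hq : q ∈ R.filter (fun il => cls il.2 == L) := List.mem_of_mem_head? (by rw [h]; simp)
  exact eq_of_beq (List.mem_filter.mp hq).2

theorem ft_mem (R : List (Int × String)) (p : Int × String) :
    p ∈ ft R ↔ ∃ q, firstOf R p.2 = some q ∧ p.1 = q.1 := by
  unfold ft
  rw [List.mem_filterMap]
  constructor
  · rintro ⟨L, _, hL⟩
    rw [Option.map_eq_some_iff] at hL
    obtain ⟨q, hq, hpe⟩ := hL
    refine ⟨q, ?_, ?_⟩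
    · rw [← hpe]; exact hq
    · rw [← hpe]
  · rintro ⟨q, hq, h1⟩
    refine ⟨p.2, ?_, ?_⟩
    · rw [← firstOf_some_cls R p.2 q hq]; exact cls_mem_SEVEN _
    · rw [hq, Option.map_some]
      congr 1
      exact Prod.ext h1.symm rfl

theorem ft_nodup (R : List (Int × String)) : (ft R).Nodup := by
  unfold ft
  apply List.Nodup.filterMap
  · intro a a' b hb hb'
    rw [Option.mem_def, Option.map_eq_some_iff] at hb hb'
    obtain ⟨q, _, hq⟩ := hb
    obtain ⟨q', _, hq'⟩ := hb'
    rw [← hq] at hq'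
    exact (congrArg Prod.snd hq').symm
  · unfold SEVEN; decide

theorem dd_perm_ft (R : List (Int × String)) (hR : R.Pairwise (fun a b => a.1 < b.1)) :
    (dd R).Perm (ft R) := by
  apply List.perm_of_nodup_nodup_toFinset_eq
  · exact (dd_pairwise R hR).imp (fun h => by intro he; subst he; exact lt_irrefl _ h)
  · exact ft_nodup R
  · ext x
    simp only [List.mem_toFinset]
    rw [dd_mem, ft_mem]

-- dedup over Set.add: adding an element already present filters its duplicates away
theorem foldl_add_filter (ys : List String) (s : PySem.Set String) (y : String) (hy : y ∈ s) :
    ys.foldl PySem.Set.add s = (ys.filter (fun z => !(z == y))).foldl PySem.Set.add s := by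
  induction ys generalizing s with
  | nil => rfl
  | cons z zs ih =>
    rw [List.filter_cons]
    by_cases hz : z = y
    · subst hz
      have hadd : PySem.Set.add s z = s := by
        simp [PySem.Set.add, PySem.Set.contains, hy]
      rw [if_neg (by simp)]
      rw [List.foldl_cons, hadd]
      exact ih s hy
    · rw [if_pos (by simp [hz])]
      rw [List.foldl_cons, List.foldl_cons]
      exact ih _ ((PySem.Set.mem_add s z y).mpr (Or.inl hy))

theorem foldl_add_cons (zs : List String) (a : String) (s : List String)
    (h : ∀ z ∈ zs, z ≠ a) :
    zs.foldl PySem.Set.add (a :: s) = a :: zs.foldl PySem.Set.add s := by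
  induction zs generalizing s with
  | nil => rfl
  | cons z zs ih =>
    have hza : z ≠ a := h z (by simp)
    have hadd : PySem.Set.add (a :: s) z
        = a :: PySem.Set.add s z := by
      by_cases hm : z ∈ s <;> simp [PySem.Set.add, PySem.Set.contains, hza, hm]
    rw [List.foldl_cons, List.foldl_cons, hadd]
    exact ih _ (fun z hz => h z (by simp [hz]))

theorem dedup_cons (y : String) (ys : List String) :
    PySem.List.dedup (y :: ys) = y :: PySem.List.dedup (ys.filter (fun z => !(z == y))) := by
  rw [show PySem.List.dedup (y :: ys) = PySem.Set.ofList (y :: ys) by simp,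
      show PySem.List.dedup (ys.filter (fun z => !(z == y)))
         = PySem.Set.ofList (ys.filter (fun z => !(z == y))) by simp,
      PySem.Set.ofList_eq_foldl, PySem.Set.ofList_eq_foldl]
  rw [List.foldl_cons]
  have hadd : PySem.Set.add ([] : PySem.Set String) y = [y] := by
    simp [PySem.Set.add, PySem.Set.contains]
  rw [hadd, foldl_add_filter ys [y] y (by simp)]
  apply foldl_add_cons
  intro z hz
  have := (List.mem_filter.mp hz).2
  simpa using this

theorem dd_map_snd (R : List (Int × String)) :
    (dd R).map (fun t => t.2) = PySem.List.dedup (R.map (fun il => cls il.2)) := by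
  induction R using dd_ind with
  | h0 => simp [dd]
  | h1 i l R' ih =>
    rw [dd, List.map_cons, List.map_cons, dedup_cons, ih, List.filter_map]
    congr 2

-- A's fold is the Set.ofList of the classified list
theorem portA_eq_dedup (pathways : List String) :
    get_top_level_pathways_py pathways
      = PySem.List.dedup (pathways.map (fun p => cls (PySem.Str.lower p))) := by
  unfold get_top_level_pathways_py
  have hstep : ∀ (acc : PySem.Set String) (p : String),
      (if PySem.Str.isIn "metabolism" (PySem.Str.lower p) then acc.add "Metabolism"
       else if PySem.Str.isIn "signal" (PySem.Str.lower p) then acc.add "Signaling"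
       else if PySem.Str.isIn "transport" (PySem.Str.lower p) then acc.add "Transport"
       else if PySem.Str.isIn "immune" (PySem.Str.lower p) then acc.add "Immune Response"
       else if PySem.Str.isIn "cell cycle" (PySem.Str.lower p) then acc.add "Cell Cycle"
       else if PySem.Str.isIn "apoptosis" (PySem.Str.lower p) then acc.add "Cell Death"
       else acc.add "Other")
      = PySem.Set.add acc (cls (PySem.Str.lower p)) := by
    intro acc p
    unfold cls
    split_ifs <;> rfl
  rw [show (fun (acc : PySem.Set String) pathway =>
      (if PySem.Str.isIn "metabolism" (PySem.Str.lower pathway) then acc.add "Metabolism"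
       else if PySem.Str.isIn "signal" (PySem.Str.lower pathway) then acc.add "Signaling"
       else if PySem.Str.isIn "transport" (PySem.Str.lower pathway) then acc.add "Transport"
       else if PySem.Str.isIn "immune" (PySem.Str.lower pathway) then acc.add "Immune Response"
       else if PySem.Str.isIn "cell cycle" (PySem.Str.lower pathway) then acc.add "Cell Cycle"
       else if PySem.Str.isIn "apoptosis" (PySem.Str.lower pathway) then acc.add "Cell Death"
       else acc.add "Other"))
      = fun acc p => PySem.Set.add acc (cls (PySem.Str.lower p)) from
      funext fun acc => funext fun p => hstep acc p]
  rw [← List.foldl_map,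
      show (PySem.Set.empty : PySem.Set String) = ([] : List String) from rfl,
      ← PySem.Set.ofList_eq_foldl]
  simp

theorem sorted_ft_eq_dd (R : List (Int × String)) (hR : R.Pairwise (fun a b => a.1 < b.1)) :
    PySem.List.sorted (ft R) (fun t => t.1) false = dd R :=
  PySem.List.sorted_eq_of_perm_of_pairwise_lt _ _ _ (dd_perm_ft R hR) (dd_pairwise R hR)

theorem map_cls_R (pathways : List String) :
    ((PySem.List.enumerate pathways 0).map (fun ip => (ip.1, PySem.Str.lower ip.2))).map
        (fun il => cls il.2)
      = pathways.map (fun p => cls (PySem.Str.lower p)) := by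
  suffices h : ∀ (s : Int),
      ((PySem.List.enumerate pathways s).map (fun ip => (ip.1, PySem.Str.lower ip.2))).map
        (fun il => cls il.2) = pathways.map (fun p => cls (PySem.Str.lower p)) from h 0
  induction pathways with
  | nil => intro s; simp [PySem.List.enumerate_nil]
  | cons x xs ih =>
    intro s
    rw [PySem.List.enumerate_cons, List.map_cons, List.map_cons, List.map_cons, ih]

-- ===== VERDICT (by name: the statement is the Claim_ definition above) =====
theorem get_top_level_pathways_py_spec : Claim_equal_get_top_level_pathways_py := by
  intro pathways _
  show get_top_level_pathways_py pathways = get_top_level_pathways_py_alt pathways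
  unfold get_top_level_pathways_py_alt
  simp only [foldl_bStep, List.nil_append]
  rw [portA_eq_dedup, ← map_cls_R pathways]
  have hRpw : ((PySem.List.enumerate pathways 0).map
      (fun ip => (ip.1, PySem.Str.lower ip.2))).Pairwise (fun a b => a.1 < b.1) := by
    apply List.Pairwise.map
    · intro a b h; exact h
    · exact PySem.List.pairwise_lt_enumerate pathways 0
  generalize hRe : (PySem.List.enumerate pathways 0).map
      (fun ip => (ip.1, PySem.Str.lower ip.2)) = R at hRpw ⊢
  rw [← dd_map_snd R, ← sorted_ft_eq_dd R hRpw]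
  cases hsc : R.filter (fun il => !(bTable.any (fun kv => PySem.Str.isIn kv.1 il.2))) with
  | nil =>
    have hft := firsts_eq_ft R
    rw [hsc] at hft
    simp only []
    rw [show tPairs bTable R = ft R from by simpa using hft]
  | cons c cs =>
    have hft := firsts_eq_ft R
    rw [hsc] at hft
    simp only []
    rw [show tPairs bTable R ++ [(c.1, "Other")] = ft R from by simpa using hft]
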